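-- pv_equiv track=rewrite | github.com/cirosantilli/project-euler-solutions | solvers/805.py | digit_k_bounds
-- ===== SOURCE A (Python) =====
-- from typing import Dict, Optional, Tuple
--
-- def digit_k_bounds(a: int, b: int, d: int) -> Tuple[Optional[int], Optional[int]]:
--     """
--     Derive bounds on the digit length k for solutions with leading digit d.
--
--     Let r = a/b (in lowest terms), D = 10b - a (>0).
--
--     From s(n) = r*n and writing n as d followed by (k-1) digits, we get:
--         n = d*b*(10^k - 1) / D   (must be an integer)
--     and the leading-digit constraint becomes two simple inequalities in 10^(k-1):
--
--     Lower bound (ensures the leading digit is at least d):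
--         a * 10^(k-1) >= b
--
--     Upper bound is only active if a(d+1) > 10b:
--         10^(k-1) < b*d / (a(d+1) - 10b)
--
--     Returns (k_low, k_high), where k_high=None means unbounded above.
--     If no k is possible, returns (None, None).
--     """
--     # Lower: find minimal e=k-1 with a*10^e >= b
--     e = 0
--     t = a
--     while t < b:
--         t *= 10
--         e += 1
--     k_low = e + 1
--
--     denom = a * (d + 1) - 10 * b
--     if denom <= 0:
--         return k_low, None
--
--     # Strict: 10^(k-1) < b*d/denom  =>  10^(k-1) <= floor((b*d - 1)/denom)
--     max_pow10 = (b * d - 1) // denom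
--     if max_pow10 <= 0:
--         return None, None
--
--     # Find largest e_high with 10^e_high <= max_pow10
--     e_high = 0
--     pow10 = 1
--     while pow10 * 10 <= max_pow10:
--         pow10 *= 10
--         e_high += 1
--
--     k_high = e_high + 1
--     return k_low, k_high
-- ===== SOURCE B (Python) =====
-- from typing import Dict, Optional, Tuple
--
-- def digit_k_bounds(a: int, b: int, d: int) -> Tuple[Optional[int], Optional[int]]:
--     # Closed-form digit-length computations replace both multiply-by-10 loops.
--     if a >= b:
--         e = 0
--     else:
--         e = len(str(b)) - len(str(a))
--         if a * 10 ** e < b: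
--             e += 1
--     k_low = e + 1
--
--     denom = a * (d + 1) - 10 * b
--     if denom <= 0:
--         return k_low, None
--
--     max_pow10 = (b * d - 1) // denom
--     if max_pow10 <= 0:
--         return None, None
--
--     return k_low, len(str(max_pow10))
-- ===== Notes on version B (the rewrite author's own statement) =====
-- stated objective: simpler
-- what changed: Both multiply-by-10 search loops are replaced by closed-form digit-length computations: k_low comes from len(str(b))-len(str(a)) with at most one adjustment, and k_high is simply len(str(max_pow10)).
import Mathlib
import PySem

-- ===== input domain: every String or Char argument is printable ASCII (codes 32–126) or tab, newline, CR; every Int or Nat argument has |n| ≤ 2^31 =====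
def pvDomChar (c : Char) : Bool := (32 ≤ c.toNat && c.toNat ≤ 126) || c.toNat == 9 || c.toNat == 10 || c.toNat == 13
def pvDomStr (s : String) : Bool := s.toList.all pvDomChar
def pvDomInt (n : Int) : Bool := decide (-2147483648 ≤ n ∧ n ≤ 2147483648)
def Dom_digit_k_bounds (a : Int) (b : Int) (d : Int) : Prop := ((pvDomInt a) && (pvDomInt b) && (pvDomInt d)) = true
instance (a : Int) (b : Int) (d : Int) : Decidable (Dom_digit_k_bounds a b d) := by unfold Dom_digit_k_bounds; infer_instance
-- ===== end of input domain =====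

-- B replaces both multiply-by-10 search loops of A by closed-form digit-length (len(str(..))) computations; objective: simpler.

-- ===== PORT A =====
-- 'while t < b: t *= 10; e += 1' — fuel only makes the recursion total; inside Pre_ 64 steps always suffice (|b| ≤ 2^31 < 10^64).
def pvLowLoopA (b : Int) : Int → Int → Nat → Int
  | _, e, 0 => e
  | t, e, f + 1 => if t < b then pvLowLoopA b (t * 10) (e + 1) f else e

-- 'while pow10 * 10 <= max_pow10: pow10 *= 10; e_high += 1' — fuel-guarded likewise (max_pow10 ≤ 2^62 < 10^64 on Dom).
def pvHighLoopA (m : Int) : Int → Int → Nat → Int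
  | _, e, 0 => e
  | p, e, f + 1 => if p * 10 ≤ m then pvHighLoopA m (p * 10) (e + 1) f else e

def digit_k_bounds (a : Int) (b : Int) (d : Int) : Option Int × Option Int :=
  let e := pvLowLoopA b a 0 64
  let k_low := e + 1
  let denom := a * (d + 1) - 10 * b
  if denom ≤ 0 then (some k_low, none)
  else
    let max_pow10 := PySem.Int.floordiv (b * d - 1) denom
    if max_pow10 ≤ 0 then (none, none)
    else
      let e_high := pvHighLoopA max_pow10 1 0 64
      (some k_low, some (e_high + 1))

-- ===== PORT B =====
-- len(str(x))
def pvDigits (x : Int) : Int := PySem.Str.len (PySem.Int.toStr x)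

def digit_k_bounds_alt (a : Int) (b : Int) (d : Int) : Option Int × Option Int :=
  let e : Int :=
    if a ≥ b then 0
    else
      let e0 := pvDigits b - pvDigits a
      -- '10 ** e0' : e0 ≥ 0 wherever this branch runs inside Pre_, so ^ e0.toNat is exact there
      if a * 10 ^ e0.toNat < b then e0 + 1 else e0
  let k_low := e + 1
  let denom := a * (d + 1) - 10 * b
  if denom ≤ 0 then (some k_low, none)
  else
    let max_pow10 := PySem.Int.floordiv (b * d - 1) denom
    if max_pow10 ≤ 0 then (none, none)
    else (some k_low, some (pvDigits max_pow10))

-- ===== PRECONDITION & SPEC =====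
-- Pre_ excludes exactly the inputs where A's first while-loop never terminates (a ≤ 0 and a < b); A returns on all others.
def Pre_digit_k_bounds (a : Int) (b : Int) (d : Int) : Prop := 0 < a ∨ b ≤ a
instance (a : Int) (b : Int) (d : Int) : Decidable (Pre_digit_k_bounds a b d) := by unfold Pre_digit_k_bounds; infer_instance
def pvWitness_digit_k_bounds : Int × Int × Int := (1, 1, 100)

def Spec_digit_k_bounds (a : Int) (b : Int) (d : Int) (out : Option Int × Option Int) : Prop := out = digit_k_bounds_alt a b d
instance (a : Int) (b : Int) (d : Int) (out : Option Int × Option Int) : Decidable (Spec_digit_k_bounds a b d out) := by unfold Spec_digit_k_bounds; infer_instance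

-- ===== CLAIM (what is proved, stated in full; the proofs are below) =====
def Claim_equal_digit_k_bounds : Prop := ∀ (a : Int) (b : Int) (d : Int), Dom_digit_k_bounds a b d → Pre_digit_k_bounds a b d → Spec_digit_k_bounds a b d (digit_k_bounds a b d)

-- ===== LEMMAS AND PROOFS =====

-- the low loop exits immediately when b ≤ t
theorem pvLowLoopA_exit (b t e : Int) (fuel : Nat) (h : b ≤ t) : pvLowLoopA b t e fuel = e := by
  cases fuel with
  | zero => rfl
  | succ f => simp [pvLowLoopA, not_lt.mpr h]

-- the low loop computes the least g with b ≤ t * 10^g (when it has enough fuel)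
theorem pvLowLoopA_spec (fuel : Nat) : ∀ (b t e : Int), (b ≤ t ∨ (0 < t ∧ b ≤ t * 10 ^ fuel)) →
    ∃ g : Nat, pvLowLoopA b t e fuel = e + g ∧ b ≤ t * 10 ^ g ∧ (g = 0 ∨ t * 10 ^ (g - 1) < b) := by
  induction fuel with
  | zero =>
    intro b t e h
    refine ⟨0, by simp [pvLowLoopA], ?_, Or.inl rfl⟩
    rcases h with h | ⟨_, h⟩ <;> simpa using h
  | succ f ih =>
    intro b t e h
    by_cases hlt : t < b
    · rcases h with h | ⟨ht, hb⟩
      · omega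
      · obtain ⟨g, hg, hle, hmin⟩ := ih b (t * 10) (e + 1)
          (Or.inr ⟨by positivity, by rw [mul_assoc, ← pow_succ']; exact hb⟩)
        refine ⟨g + 1, ?_, ?_, Or.inr ?_⟩
        · simp only [pvLowLoopA, if_pos hlt, hg]; push_cast; ring
        · rw [pow_succ', ← mul_assoc]; exact hle
        · rcases hmin with hg0 | hlt' 
          · subst hg0; simpa using hlt
          · rcases Nat.eq_zero_or_pos g with h0 | h1
            · subst h0; simpa using hlt
            have hpow : t * 10 ^ (g + 1 - 1) = t * 10 * 10 ^ (g - 1) := by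
                have hgg : g + 1 - 1 = (g - 1) + 1 := by omega
                rw [hgg, pow_succ]; ring
            rw [hpow]; exact hlt'
    · exact ⟨0, by cases fuel' : f + 1 <;> simp [pvLowLoopA, hlt], by simpa using not_lt.mp hlt, Or.inl rfl⟩

-- the high loop computes the largest g with p * 10^g ≤ m (when it has enough fuel)
theorem pvHighLoopA_spec (fuel : Nat) : ∀ (m p e : Int), 0 < p → p ≤ m → m < p * 10 ^ fuel →
    ∃ g : Nat, pvHighLoopA m p e fuel = e + g ∧ p * 10 ^ g ≤ m ∧ m < p * 10 ^ (g + 1) := by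
  induction fuel with
  | zero => intro m p e hp hpm hlt; simp at hlt; omega
  | succ f ih =>
    intro m p e hp hpm hlt
    by_cases hstep : p * 10 ≤ m
    · obtain ⟨g, hg, hle, hub⟩ := ih m (p * 10) (e + 1) (by positivity) hstep
        (by rw [mul_assoc, ← pow_succ']; exact hlt)
      refine ⟨g + 1, ?_, ?_, ?_⟩
      · simp only [pvHighLoopA, if_pos hstep, hg]; push_cast; ring
      · rw [pow_succ', ← mul_assoc]; exact hle
      · rw [pow_succ', ← mul_assoc]; exact hub
    · refine ⟨0, by simp [pvHighLoopA, hstep], by simpa using hpm, by simpa using not_le.mp hstep⟩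

-- len(str x) for 0 < x : the number of decimal digits, bracketed by powers of 10
theorem pvDigits_spec (x : Int) (hx : 0 < x) :
    ∃ L : Nat, pvDigits x = (L : Int) ∧ 1 ≤ L ∧ 10 ^ (L - 1) ≤ x ∧ x < 10 ^ L := by
  have hneg : ¬ x < 0 := by omega
  refine ⟨(Nat.toDigits 10 x.toNat).length, ?_, Nat.length_toDigits_pos, ?_, ?_⟩
  · simp [pvDigits, PySem.Str.len_eq, PySem.Int.toList_toStr, PySem.Int.toChars, hneg]
  · set L := (Nat.toDigits 10 x.toNat).length with hL
    rcases Nat.eq_or_lt_of_le (Nat.length_toDigits_pos (b := 10) (n := x.toNat)) with h1 | h1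
    · have : L - 1 = 0 := by omega
      rw [this]; simpa using hx
    · have hnotle : ¬ (L ≤ L - 1) := by omega
      have := (Nat.length_toDigits_le_iff (b := 10) (n := x.toNat) (k := L - 1)
        (by norm_num) (by omega)).not.mp hnotle
      have h2 : 10 ^ (L - 1) ≤ x.toNat := by omega
      calc (10 : Int) ^ (L - 1) = ((10 ^ (L - 1) : Nat) : Int) := by push_cast; ring
        _ ≤ (x.toNat : Int) := by exact_mod_cast h2
        _ = x := by omega
  · set L := (Nat.toDigits 10 x.toNat).length with hL
    have h2 : x.toNat < 10 ^ L := (Nat.length_toDigits_le_iff (b := 10) (n := x.toNat)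
      (by norm_num) Nat.length_toDigits_pos).mp le_rfl
    calc x = (x.toNat : Int) := by omega
      _ < ((10 ^ L : Nat) : Int) := by exact_mod_cast h2
      _ = 10 ^ L := by push_cast; ring

-- the g with 10^g ≤ x < 10^(g+1) is unique
theorem pow10_bracket_unique (x : Int) (g h : Nat)
    (hg1 : 10 ^ g ≤ x) (hg2 : x < 10 ^ (g + 1)) (hh1 : 10 ^ h ≤ x) (hh2 : x < 10 ^ (h + 1)) : g = h := by
  by_contra hne
  rcases Nat.lt_or_ge g h with hlt | hge
  · have : (10 : Int) ^ (g + 1) ≤ 10 ^ h := pow_le_pow_right₀ (by norm_num) (by omega)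
    omega
  · have hlt : h < g := by omega
    have : (10 : Int) ^ (h + 1) ≤ 10 ^ g := pow_le_pow_right₀ (by norm_num) (by omega)
    omega

-- the least g with b ≤ a * 10^g is unique (a > 0)
theorem min_pow10_unique (a b : Int) (ha : 0 < a) (g h : Nat)
    (hg1 : b ≤ a * 10 ^ g) (hg2 : g = 0 ∨ a * 10 ^ (g - 1) < b)
    (hh1 : b ≤ a * 10 ^ h) (hh2 : h = 0 ∨ a * 10 ^ (h - 1) < b) : g = h := by
  by_contra hne
  rcases Nat.lt_or_ge g h with hlt | hge
  · rcases hh2 with h0 | hh2'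
    · omega
    · have : a * 10 ^ g ≤ a * 10 ^ (h - 1) :=
        mul_le_mul_of_nonneg_left (pow_le_pow_right₀ (by norm_num) (by omega)) (by omega)
      omega
  · have hlt : h < g := by omega
    rcases hg2 with h0 | hg2'
    · omega
    · have : a * 10 ^ h ≤ a * 10 ^ (g - 1) :=
        mul_le_mul_of_nonneg_left (pow_le_pow_right₀ (by norm_num) (by omega)) (by omega)
      omega

-- the low loop of A equals B's closed-form e, inside Dom ∧ Pre_
theorem low_eq (a b : Int) (hb : b ≤ 2147483648) (hpre : 0 < a ∨ b ≤ a) :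
    pvLowLoopA b a 0 64 =
      (if a ≥ b then (0 : Int)
       else if a * 10 ^ (pvDigits b - pvDigits a).toNat < b then (pvDigits b - pvDigits a) + 1
       else pvDigits b - pvDigits a) := by
  by_cases hab : a ≥ b
  · rw [if_pos hab, pvLowLoopA_exit b a 0 64 hab]
  · rw [if_neg hab]
    have hba : a < b := not_le.mp hab
    have ha : 0 < a := by rcases hpre with h | h; exact h; omega
    have hbpos : 0 < b := by omega
    obtain ⟨gA, hgA, hAle, hAmin⟩ := pvLowLoopA_spec 64 b a 0
      (Or.inr ⟨ha, by
        have h1 : (10 : Int) ^ (64 : Nat) ≤ a * 10 ^ (64 : Nat) := le_mul_of_one_le_left (by positivity) ha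
        have h2 : b < (10 : Int) ^ (64 : Nat) := by norm_num; omega
        omega⟩)
    obtain ⟨La, hEa, hLa1, hale, halt⟩ := pvDigits_spec a ha
    obtain ⟨Lb, hEb, hLb1, hble, hblt⟩ := pvDigits_spec b hbpos
    have hLab : La ≤ Lb := by
      by_contra hgt
      have : (10 : Int) ^ Lb ≤ 10 ^ (La - 1) := pow_le_pow_right₀ (by norm_num) (by omega)
      omega
    have he0 : (pvDigits b - pvDigits a).toNat = Lb - La := by rw [hEa, hEb]; omega
    have he0' : pvDigits b - pvDigits a = ((Lb - La : Nat) : Int) := by rw [hEa, hEb]; omega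
    rw [he0, he0']
    set k : Nat := Lb - La with hk
    -- the candidate produced by B, with its bracket properties
    have hup : a * 10 ^ (k + 1) ≥ 10 ^ Lb := by
      have : (10 : Int) ^ (La - 1) * 10 ^ (k + 1) ≤ a * 10 ^ (k + 1) :=
        mul_le_mul_of_nonneg_right hale (by positivity)
      have hpow : (10 : Int) ^ (La - 1) * 10 ^ (k + 1) = 10 ^ Lb := by
        rw [← pow_add]; congr 1; omega
      omega
    by_cases hcase : a * 10 ^ k < b
    · rw [if_pos hcase]
      have hBle : b ≤ a * 10 ^ (k + 1) := by omega
      have hBmin : (k + 1 = 0) ∨ a * 10 ^ (k + 1 - 1) < b := Or.inr (by simpa using hcase)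
      have := min_pow10_unique a b ha gA (k + 1) hAle hAmin hBle hBmin
      rw [hgA, this]; push_cast; ring
    · rw [if_neg hcase]
      have hBle : b ≤ a * 10 ^ k := not_lt.mp hcase
      have hBmin : (k = 0) ∨ a * 10 ^ (k - 1) < b := by
        rcases Nat.eq_zero_or_pos k with h0 | h1
        · exact Or.inl h0
        · refine Or.inr ?_
          have h2 : a * 10 ^ (k - 1) < 10 ^ La * 10 ^ (k - 1) :=
            mul_lt_mul_of_pos_right halt (by positivity)
          have hpow : (10 : Int) ^ La * 10 ^ (k - 1) = 10 ^ (Lb - 1) := by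
            rw [← pow_add]; congr 1; omega
          have h3 : (10 : Int) ^ (Lb - 1) ≤ b := hble
          omega
      have := min_pow10_unique a b ha gA k hAle hAmin hBle hBmin
      rw [hgA, this]; ring

-- the high loop of A (plus one) equals len(str max_pow10), for 0 < m ≤ 2^62
theorem high_eq (m : Int) (hm : 0 < m) (hub : m ≤ 4611686018427387904) :
    pvHighLoopA m 1 0 64 + 1 = pvDigits m := by
  obtain ⟨g, hg, hgle, hglt⟩ := pvHighLoopA_spec 64 m 1 0 (by norm_num) (by omega) (by norm_num; omega)
  obtain ⟨L, hE, hL1, hLle, hLlt⟩ := pvDigits_spec m hm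
  have hgL : g = L - 1 := by
    refine pow10_bracket_unique m g (L - 1) (by simpa using hgle) (by simpa using hglt)
      hLle ?_
    have : L - 1 + 1 = L := by omega
    rw [this]; exact hLlt
  rw [hg, hE, hgL]
  omega

-- ===== VERDICT (by name: the statement is the Claim_ definition above) =====
set_option maxRecDepth 8192 in
theorem digit_k_bounds_spec : Claim_equal_digit_k_bounds := by
  intro a b d hdom hpre
  unfold Spec_digit_k_bounds
  simp only [Dom_digit_k_bounds, pvDomInt, Bool.and_eq_true, decide_eq_true_eq] at hdom
  obtain ⟨⟨⟨ha1, ha2⟩, hb1, hb2⟩, hd1, hd2⟩ := hdom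
  have hlow := low_eq a b hb2 hpre
  simp only [digit_k_bounds, digit_k_bounds_alt, hlow]
  by_cases hden : a * (d + 1) - 10 * b ≤ 0
  · simp [hden]
  · simp only [if_neg hden]
    set mp := PySem.Int.floordiv (b * d - 1) (a * (d + 1) - 10 * b) with hmp
    by_cases hmp0 : mp ≤ 0
    · simp [hmp0]
    · have hmpos : 0 < mp := by omega
      have hdpos : (0 : Int) < a * (d + 1) - 10 * b := by omega
      have hmub : mp ≤ 4611686018427387904 := by
        have h1 : mp * (a * (d + 1) - 10 * b) ≤ b * d - 1 :=
          (PySem.Int.le_floordiv_iff_mul_le hdpos).mp (le_of_eq hmp)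
        have h2 : mp ≤ mp * (a * (d + 1) - 10 * b) := le_mul_of_one_le_right (by omega) (by omega)
        nlinarith
      rw [if_neg hmp0, if_neg hmp0, high_eq mp hmpos hmub]
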